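-- pv_equiv track=rewrite | github.com/msrosenberg/ImpactFactor | Impact_Funcs.py | calculate_two_sided_h
-- ===== SOURCE A (Python) =====
-- from typing import Tuple, Union, Optional
--
-- def calculate_two_sided_h(citations: list, rank_order: list, h: int, multidim_h: list,
--                           mk: Optional[int] = None) -> list:
--     # only need to calculate the upper part of the index the center and tail are identical to multidimensional h
--     # mk is the number of steps to match on either side of h; the default is to auto-calculate for as many steps in
--     # core as equal to length of steps in tail
--     if mk is None:
--         mk = len(multidim_h)
--     else:
--         mk += 1  # need to add 1 so number of steps works out correctly
--     two_sided_h = [i for i in multidim_h[:mk]]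
--     j = 0
--     tmph = h
--     k = 1
--     while k < mk:
--         j += tmph
--         tmph = 0
--         for i in range(len(citations)):
--             if rank_order[i] <= citations[i] - j:
--                 tmph += 1
--         two_sided_h.insert(0, tmph)
--         k += 1
--     return two_sided_h
-- ===== SOURCE B (Python) =====
-- def _bisect_left(a, x):
--     lo, hi = 0, len(a)
--     while lo < hi:
--         mid = (lo + hi) // 2
--         if a[mid] < x:
--             lo = mid + 1
--         else:
--             hi = mid
--     return lo
--
--
-- def calculate_two_sided_h(citations: list, rank_order: list, h: int, multidim_h: list,
--                           mk=None) -> list: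
--     mk = len(multidim_h) if mk is None else mk + 1
--     # d[i] = citations[i] - rank_order[i]; rank_order[i] <= citations[i] - j  <=>  d[i] >= j
--     diffs = sorted(c - r for c, r in zip(citations, rank_order))
--     n = len(diffs)
--     counts = []
--     j = h
--     for _ in range(mk - 1):
--         tmph = n - _bisect_left(diffs, j)
--         counts.append(tmph)
--         j += tmph
--     return counts[::-1] + multidim_h[:mk]
-- ===== Notes on version B (the rewrite author's own statement) =====
-- stated objective: faster
-- what changed: B precomputes the differences citations[i]-rank_order[i] once, sorts them, and answers each step's core count by binary search instead of rescanning all papers every step.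
import Mathlib
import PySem

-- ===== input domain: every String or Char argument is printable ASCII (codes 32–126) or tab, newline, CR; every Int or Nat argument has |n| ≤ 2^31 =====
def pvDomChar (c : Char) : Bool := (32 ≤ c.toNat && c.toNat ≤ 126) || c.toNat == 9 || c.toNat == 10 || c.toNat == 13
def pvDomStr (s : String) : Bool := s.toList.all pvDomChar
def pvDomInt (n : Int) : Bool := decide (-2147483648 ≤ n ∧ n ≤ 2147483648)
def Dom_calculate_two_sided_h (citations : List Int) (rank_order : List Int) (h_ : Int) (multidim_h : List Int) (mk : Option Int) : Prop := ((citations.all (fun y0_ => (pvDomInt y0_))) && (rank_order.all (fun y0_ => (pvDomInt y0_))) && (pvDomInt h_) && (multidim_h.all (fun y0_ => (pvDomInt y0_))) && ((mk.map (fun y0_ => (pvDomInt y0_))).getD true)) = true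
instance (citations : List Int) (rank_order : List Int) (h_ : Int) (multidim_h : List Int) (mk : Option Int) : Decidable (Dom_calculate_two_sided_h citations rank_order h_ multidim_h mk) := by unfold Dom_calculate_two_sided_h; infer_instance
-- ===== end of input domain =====

-- B replaces A's per-step rescan of all papers by one sorted difference list queried by binary
-- search each step (objective: faster, asymptotic).

-- effective step bound: `mk = len(multidim_h) if mk is None else mk + 1` (shared trivial
-- prologue of both Pythons; also used by Pre_)
def pvMkEff (multidim_h : List Int) (mk : Option Int) : Int :=
  match mk with
  | none => (multidim_h.length : Int)
  | some m => m + 1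

-- ===== PORT A =====
-- inner `for i in range(len(citations)): if rank_order[i] <= citations[i] - j: tmph += 1`
-- (indexing via pyGetD; exact whenever len(citations) ≤ len(rank_order), which Pre_ guarantees
-- whenever this loop runs — Python raises IndexError otherwise)
def pvA_inner (citations rank_order : List Int) (j : Int) : Int :=
  (PySem.List.pyRange 0 (citations.length : Int) 1).foldl
    (fun tmph i =>
      if PySem.List.pyGetD rank_order i 0 ≤ PySem.List.pyGetD citations i 0 - j then tmph + 1
      else tmph) 0

-- the `while k < mk` loop, running (mk-1) times with state j, tmph, and the accumulating list
def pvA_loop (citations rank_order : List Int) : Nat → Int → Int → List Int → List Int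
  | 0, _, _, acc => acc
  | s + 1, j, tmph, acc =>
    let j' := j + tmph
    let t := pvA_inner citations rank_order j'
    pvA_loop citations rank_order s j' t (t :: acc)

def calculate_two_sided_h (citations : List Int) (rank_order : List Int) (h_ : Int) (multidim_h : List Int) (mk : Option Int) : List Int :=
  let mk' := pvMkEff multidim_h mk
  pvA_loop citations rank_order (mk' - 1).toNat 0 h_
    (PySem.List.slice multidim_h none (some mk'))

-- ===== PORT B =====
-- `n - _bisect_left(diffs, j)`; _bisect_left's hand-written lo/hi/mid loop is exactly
-- PySem.List.bisectLeft's loop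
def pvB_count (diffs : List Int) (j : Int) : Int :=
  (diffs.length : Int) - (PySem.List.bisectLeft diffs j : Int)

-- the `for _ in range(mk - 1)` loop, building `counts` front-to-back
def pvB_counts (diffs : List Int) : Nat → Int → List Int
  | 0, _ => []
  | s + 1, j =>
    let t := pvB_count diffs j
    t :: pvB_counts diffs s (j + t)

def calculate_two_sided_h_alt (citations : List Int) (rank_order : List Int) (h_ : Int) (multidim_h : List Int) (mk : Option Int) : List Int :=
  let mk' := pvMkEff multidim_h mk
  let diffs := PySem.List.sorted (List.zipWith (fun c r => c - r) citations rank_order) id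
  -- counts[::-1] + multidim_h[:mk]
  (pvB_counts diffs (mk' - 1).toNat h_).reverse ++ PySem.List.slice multidim_h none (some mk')

-- ===== PRECONDITION & SPEC =====
-- Pre_ excludes exactly the inputs where A raises IndexError: rank_order shorter than
-- citations while the core loop runs at least once (effective mk ≥ 2).
def Pre_calculate_two_sided_h (citations : List Int) (rank_order : List Int) (h_ : Int) (multidim_h : List Int) (mk : Option Int) : Prop :=
  citations.length ≤ rank_order.length ∨ pvMkEff multidim_h mk ≤ 1

instance (citations : List Int) (rank_order : List Int) (h_ : Int) (multidim_h : List Int) (mk : Option Int) : Decidable (Pre_calculate_two_sided_h citations rank_order h_ multidim_h mk) := by unfold Pre_calculate_two_sided_h; infer_instance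

def pvWitness_calculate_two_sided_h : List Int × List Int × Int × List Int × Option Int :=
  ([3, 2, 1], [1, 2, 3], 2, [2, 1], none)

def Spec_calculate_two_sided_h (citations : List Int) (rank_order : List Int) (h_ : Int) (multidim_h : List Int) (mk : Option Int) (out : List Int) : Prop := out = calculate_two_sided_h_alt citations rank_order h_ multidim_h mk
instance (citations : List Int) (rank_order : List Int) (h_ : Int) (multidim_h : List Int) (mk : Option Int) (out : List Int) : Decidable (Spec_calculate_two_sided_h citations rank_order h_ multidim_h mk out) := by unfold Spec_calculate_two_sided_h; infer_instance

-- ===== CLAIM (what is proved, stated in full; the proofs are below) =====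
def Claim_equal_calculate_two_sided_h : Prop := ∀ (citations : List Int) (rank_order : List Int) (h_ : Int) (multidim_h : List Int) (mk : Option Int), Dom_calculate_two_sided_h citations rank_order h_ multidim_h mk → Pre_calculate_two_sided_h citations rank_order h_ multidim_h mk → Spec_calculate_two_sided_h citations rank_order h_ multidim_h mk (calculate_two_sided_h citations rank_order h_ multidim_h mk)


-- ===== LEMMAS AND PROOFS =====

-- A's inner scan counts indices i with rank_order[i] ≤ citations[i] - j, i.e. the entries of
-- the (unsorted) difference list that are ≥ j.
theorem pv_foldl_count (l : List Int) (p : Int → Prop) [DecidablePred p] (c : Int) :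
    l.foldl (fun t i => if p i then t + 1 else t) c
      = c + (l.countP (fun i => decide (p i)) : Int) := by
  induction l generalizing c with
  | nil => simp
  | cons a l ih =>
    simp only [List.foldl_cons, List.countP_cons, ih]
    by_cases h : p a <;> simp [h] <;> omega

theorem pv_count_index (cs rs : List Int) (j : Int) (hlen : cs.length ≤ rs.length) :
    (List.range cs.length).countP (fun k => decide (rs.getD k 0 ≤ cs.getD k 0 - j))
      = (List.zipWith (fun c r => c - r) cs rs).countP (fun d => decide (j ≤ d)) := by
  induction cs generalizing rs with
  | nil => simp
  | cons c cs' ih =>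
    cases rs with
    | nil => simp at hlen
    | cons r rs' =>
      simp only [List.length_cons, List.range_succ_eq_map, List.countP_cons, List.countP_map,
        List.zipWith_cons_cons]
      have h1 : (List.range cs'.length).countP
          ((fun k => decide ((r :: rs').getD k 0 ≤ (c :: cs').getD k 0 - j)) ∘ Nat.succ)
          = (List.zipWith (fun c r => c - r) cs' rs').countP (fun d => decide (j ≤ d)) := by
        rw [← ih rs' (by simpa using hlen)]
        apply List.countP_congr
        intro k _
        simp [Function.comp]
      rw [h1]
      have h2 : decide ((r :: rs').getD 0 0 ≤ (c :: cs').getD 0 0 - j)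
          = decide (j ≤ c - r) := by
        simp only [List.getD_cons_zero]
        exact decide_eq_decide.mpr (by omega)
      rw [h2]

-- A's inner scan counts indices i with rank_order[i] ≤ citations[i] - j, i.e. the entries of
-- the (unsorted) difference list that are ≥ j.
theorem pvA_inner_eq_countP (cs rs : List Int) (j : Int) (hlen : cs.length ≤ rs.length) :
    pvA_inner cs rs j =
      ((List.zipWith (fun c r => c - r) cs rs).countP (fun d => decide (j ≤ d)) : Int) := by
  unfold pvA_inner
  rw [pv_foldl_count, zero_add]
  rw [PySem.List.pyRange_zero_natCast, List.countP_map]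
  rw [← pv_count_index cs rs j hlen]
  norm_cast
  apply List.countP_congr
  intro k _
  simp [Function.comp, PySem.List.pyGetD_of_nonneg]

-- bisect on a sorted list: n - bisectLeft ds j counts the entries ≥ j
theorem pvB_count_eq_countP (ds : List Int) (j : Int)
    (hs : ds.Pairwise (fun a b => a ≤ b)) :
    pvB_count ds j = (ds.countP (fun d => decide (j ≤ d)) : Int) := by
  obtain ⟨hk, hlt, hge⟩ := PySem.List.bisectLeft_spec ds j hs
  set k := PySem.List.bisectLeft ds j with hkdef
  have hsplit : ds = ds.take k ++ ds.drop k := (List.take_append_drop k ds).symm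
  have htake : (ds.take k).countP (fun d => decide (j ≤ d)) = 0 := by
    rw [List.countP_eq_zero]
    intro a ha
    obtain ⟨i, hi, hia⟩ := List.getElem_of_mem ha
    have hik : i < k := lt_of_lt_of_le hi (by simp)
    have hin : i < ds.length := lt_of_lt_of_le hik hk
    have := hlt i hin hik
    rw [List.getElem_take] at hia
    simp only [decide_eq_true_eq]
    omega
  have hdrop : (ds.drop k).countP (fun d => decide (j ≤ d)) = (ds.drop k).length := by
    rw [List.countP_eq_length]
    intro a ha
    obtain ⟨i, hi, hia⟩ := List.getElem_of_mem ha
    rw [List.getElem_drop] at hia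
    have hin : k + i < ds.length := by simp at hi; omega
    have := hge (k + i) hin (by omega)
    simp only [decide_eq_true_eq]
    omega
  conv_rhs => rw [hsplit]
  rw [List.countP_append, htake, hdrop, List.length_drop]
  unfold pvB_count
  push_cast
  omega

theorem pvInner_eq_pvB_count (cs rs : List Int) (j : Int) (hlen : cs.length ≤ rs.length) :
    pvA_inner cs rs j =
      pvB_count (PySem.List.sorted (List.zipWith (fun c r => c - r) cs rs) id) j := by
  rw [pvA_inner_eq_countP cs rs j hlen]
  rw [pvB_count_eq_countP _ j (by simpa using PySem.List.sorted_pairwise (List.zipWith (fun c r => c - r) cs rs) id)]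
  rw [(PySem.List.sorted_perm (List.zipWith (fun c r => c - r) cs rs) id false).countP_eq]

theorem pvLoop_eq (cs rs : List Int)
    (hinner : ∀ j, pvA_inner cs rs j =
      pvB_count (PySem.List.sorted (List.zipWith (fun c r => c - r) cs rs) id) j)
    (s : Nat) (j tmph : Int) (acc : List Int) :
    pvA_loop cs rs s j tmph acc =
      (pvB_counts (PySem.List.sorted (List.zipWith (fun c r => c - r) cs rs) id) s (j + tmph)).reverse
        ++ acc := by
  induction s generalizing j tmph acc with
  | zero => rfl
  | succ s ih =>
    show pvA_loop cs rs s (j + tmph) _ _ = _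
    rw [hinner, ih]
    simp [pvB_counts]

-- ===== VERDICT (by name: the statement is the Claim_ definition above) =====
theorem calculate_two_sided_h_spec : Claim_equal_calculate_two_sided_h := by
  intro citations rank_order h_ multidim_h mk _ hpre
  unfold Spec_calculate_two_sided_h calculate_two_sided_h calculate_two_sided_h_alt
  rcases hpre with hl | hmk
  · rw [pvLoop_eq citations rank_order (fun j => pvInner_eq_pvB_count citations rank_order j hl)]
    rw [zero_add]
  · have h0 : (pvMkEff multidim_h mk - 1).toNat = 0 := by omega
    simp only [h0]
    rfl
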